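-- pv_equiv track=rewrite | github.com/charlesvestal/sf2-to-opxy | src/sf2_to_opxy/converter.py | _frame_amplitude
-- ===== SOURCE A (Python) =====
-- from typing import Dict, List, Tuple
--
-- def _frame_amplitude(pcm: List[int], frame_idx: int, channels: int) -> int:
--     start = frame_idx * channels
--     end = start + channels
--     max_amp = 0
--     for i in range(start, end):
--         value = pcm[i]
--         if value < 0:
--             value = -value
--         if value > max_amp:
--             max_amp = value
--     return max_amp
-- ===== SOURCE B (Python) =====
-- def _frame_amplitude(pcm, frame_idx, channels):
--     if channels <= 0:
--         return 0
--     start = frame_idx * channels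
--     mags = sorted(abs(v) for v in pcm[start:start + channels])
--     return mags[-1] if mags else 0
-- ===== Notes on version B (the rewrite author's own statement) =====
-- stated objective: alternative
-- what changed: A folds abs through a single running max accumulator over computed indices; B slices the frame, maps each sample to its magnitude, sorts the magnitudes, and returns the last element of the sorted list (sort-then-take-last instead of a one-pass accumulator).
-- outside the precondition, e.g. on _frame_amplitude([1, 2, 3], -1, 1): A returns 3, B returns 0
import Mathlib
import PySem

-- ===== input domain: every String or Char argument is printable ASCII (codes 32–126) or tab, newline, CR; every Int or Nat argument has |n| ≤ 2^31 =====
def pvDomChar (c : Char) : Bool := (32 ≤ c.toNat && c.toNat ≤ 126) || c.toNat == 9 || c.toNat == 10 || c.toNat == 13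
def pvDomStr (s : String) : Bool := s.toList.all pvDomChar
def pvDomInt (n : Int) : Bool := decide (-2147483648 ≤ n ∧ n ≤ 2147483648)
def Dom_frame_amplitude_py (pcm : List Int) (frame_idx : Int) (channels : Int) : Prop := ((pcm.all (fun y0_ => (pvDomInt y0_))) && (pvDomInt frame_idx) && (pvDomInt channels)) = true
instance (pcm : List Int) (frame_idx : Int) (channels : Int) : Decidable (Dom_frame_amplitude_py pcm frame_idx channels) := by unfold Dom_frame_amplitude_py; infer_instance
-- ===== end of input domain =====

-- B replaces A's single-pass running abs-max accumulator over computed indices by a staged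
-- sort-then-take-last algorithm: slice the frame, map to magnitudes, sort, return the last
-- element (objective: alternative; O(channels log channels) vs A's O(channels)).


-- ===== PORT A =====
def frame_amplitude_py (pcm : List Int) (frame_idx : Int) (channels : Int) : Int :=
  let start := frame_idx * channels
  let stop := start + channels
  (PySem.List.pyRange start stop 1).foldl
    (fun max_amp i =>
      let value := PySem.List.pyGetD pcm i 0   -- pcm[i]; IndexError excluded by Pre_
      let value := if value < 0 then -value else value
      if value > max_amp then value else max_amp)
    0

-- ===== PORT B =====
def frame_amplitude_py_alt (pcm : List Int) (frame_idx : Int) (channels : Int) : Int :=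
  if channels ≤ 0 then 0
  else
    let start := frame_idx * channels
    let mags := PySem.List.sorted
      ((PySem.List.slice pcm (some start) (some (start + channels))).map (fun v => |v|))
      (fun x => x) false
    if mags = [] then 0 else PySem.List.pyGetD mags (-1) 0   -- mags[-1] if mags else 0

-- ===== PRECONDITION & SPEC =====
-- Pre_ restricts to the natural frame domain: either no channels, or the frame
-- [frame_idx*channels, frame_idx*channels+channels) lies inside pcm. It excludes frames
-- reaching past either end of pcm (A raises IndexError) and frames with a negative
-- start, where A's value comes from Python's negative-index wraparound, outside the
-- function's intended domain of nonnegative frame positions.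
def Pre_frame_amplitude_py (pcm : List Int) (frame_idx : Int) (channels : Int) : Prop :=
  channels ≤ 0 ∨ (0 ≤ frame_idx * channels ∧ frame_idx * channels + channels ≤ pcm.length)
instance (pcm : List Int) (frame_idx : Int) (channels : Int) : Decidable (Pre_frame_amplitude_py pcm frame_idx channels) := by unfold Pre_frame_amplitude_py; infer_instance

def pvWitness_frame_amplitude_py : List Int × Int × Int := ([3, -7, 2, 5], 1, 2)

def Spec_frame_amplitude_py (pcm : List Int) (frame_idx : Int) (channels : Int) (out : Int) : Prop := out = frame_amplitude_py_alt pcm frame_idx channels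
instance (pcm : List Int) (frame_idx : Int) (channels : Int) (out : Int) : Decidable (Spec_frame_amplitude_py pcm frame_idx channels out) := by unfold Spec_frame_amplitude_py; infer_instance

-- ===== CLAIM (what is proved, stated in full; the proofs are below) =====
def Claim_equal_frame_amplitude_py : Prop := ∀ (pcm : List Int) (frame_idx : Int) (channels : Int), Dom_frame_amplitude_py pcm frame_idx channels → Pre_frame_amplitude_py pcm frame_idx channels → Spec_frame_amplitude_py pcm frame_idx channels (frame_amplitude_py pcm frame_idx channels)

-- ===== LEMMAS AND PROOFS =====

-- A's fold step is max-with-magnitude.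
lemma amp_step (m v : Int) :
    (if (if v < 0 then -v else v) > m then (if v < 0 then -v else v) else m)
      = max m |v| := by
  rcases lt_or_ge v 0 with h | h
  · rw [abs_of_neg h]; split_ifs <;> omega
  · rw [abs_of_nonneg (by omega : (0:Int) ≤ v)]; split_ifs <;> omega

-- foldl max is permutation-invariant.
lemma foldl_max_perm {l₁ l₂ : List Int} (p : l₁.Perm l₂) :
    ∀ init : Int, l₁.foldl max init = l₂.foldl max init := by
  induction p with
  | nil => intro init; rfl
  | cons x _ ih => intro init; simpa using ih (max init x)
  | swap x y l =>
    intro init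
    have h : max (max init y) x = max (max init x) y := by omega
    simp [h]
  | trans _ _ ih₁ ih₂ => intro init; rw [ih₁ init, ih₂ init]

-- folding max from a seed below a bound that dominates the list stays below the bound.
lemma foldl_max_le (l : List Int) : ∀ init x : Int, init ≤ x → (∀ y ∈ l, y ≤ x) →
    l.foldl max init ≤ x := by
  induction l with
  | nil => intro init x h _; simpa using h
  | cons z zs ih =>
    intro init x h hall
    simp only [List.foldl_cons]
    exact ih (max init z) x (by have := hall z (by simp); omega)
      (fun y hy => hall y (by simp [hy]))

-- on a nondecreasing list of nonnegatives, foldl max 0 is the last element.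
lemma foldl_max_sorted (s : List Int) (hp : s.Pairwise (· ≤ ·)) (hn : ∀ y ∈ s, 0 ≤ y)
    (hne : s ≠ []) (h : s.length - 1 < s.length) : s.foldl max 0 = s[s.length - 1] := by
  induction s using List.reverseRecOn with
  | nil => exact absurd rfl hne
  | append_singleton s x _ =>
    have hlen : (s ++ [x]).length - 1 = s.length := by simp
    have hx : (s ++ [x])[(s ++ [x]).length - 1] = x := by
      simp [List.getElem_append_right (le_refl s.length)]
    rw [hx, List.foldl_append]
    have hdom : ∀ y ∈ s, y ≤ x := by
      intro y hy
      have := (List.pairwise_append.mp hp).2.2 y hy x (by simp)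
      exact this
    have hx0 : 0 ≤ x := hn x (by simp)
    have hle : s.foldl max 0 ≤ x := foldl_max_le s 0 x hx0 hdom
    simp only [List.foldl_cons, List.foldl_nil]
    omega

-- The indexed loop over range(start, stop) reads exactly the slice pcm[start:stop] (in-range case).
lemma amp_range_fold (pcm : List Int) (a b : Int) (h0 : 0 ≤ a) (hb0 : 0 ≤ b) (hb : b ≤ (pcm.length : Int))
    (f : Int → Int → Int) (init : Int) :
    (PySem.List.pyRange a b 1).foldl (fun acc i => f acc (PySem.List.pyGetD pcm i 0)) init
      = (PySem.List.slice pcm (some a) (some b)).foldl f init := by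
  by_cases hab : b ≤ a
  · rw [PySem.List.pyRange_one_eq_nil hab]
    have hnil : PySem.List.slice pcm (some a) (some b) = [] := by
      apply List.eq_nil_of_length_eq_zero
      rw [PySem.List.length_slice]
      have hmono : PySem.List.clampIdx pcm.length b ≤ PySem.List.clampIdx pcm.length a := by
        unfold PySem.List.clampIdx
        split_ifs <;> omega
      omega
    rw [hnil]
    rfl
  · push Not at hab
    have hlen : (((pcm.take b.toNat).length : Nat) : Int) = b := by
      simp [List.length_take]
      omega
    have key : (PySem.List.pyRange a b 1).foldl (fun acc i => f acc (PySem.List.pyGetD pcm i 0)) init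
        = (PySem.List.pyRange a b 1).foldl (fun acc i => f acc (PySem.List.pyGetD (pcm.take b.toNat) i 0)) init := by
      apply PySem.List.foldl_congr_mem
      intro acc i hi
      rw [PySem.List.mem_pyRange_one] at hi
      have hi0 : (0:Int) ≤ i := le_trans h0 hi.1
      have hilen : i < ((pcm.take b.toNat).length : Int) := by omega
      have hilen' : i < (pcm.length : Int) := by omega
      rw [PySem.List.pyGetD_eq_getElem pcm 0 hi0 hilen',
          PySem.List.pyGetD_eq_getElem (pcm.take b.toNat) 0 hi0 hilen,
          List.getElem_take]
    have hmain := PySem.List.foldl_pyRange_pyGetD' (pcm.take b.toNat) 0 f init h0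
    rw [hlen] at hmain
    rw [key, hmain, PySem.List.slice_of_nonneg pcm h0 hb0 (by omega) hb, List.drop_take]

-- A's accumulator loop over any element list equals B's sort-then-last combination.
lemma amp_sorted_closed (l : List Int) :
    l.foldl (fun m v => max m |v|) 0
      = (let mags := PySem.List.sorted (l.map (fun v => |v|)) (fun x => x) false
         if mags = [] then 0 else PySem.List.pyGetD mags (-1) 0) := by
  set mags := PySem.List.sorted (l.map (fun v => |v|)) (fun x => x) false with hm
  have hfold : l.foldl (fun m v => max m |v|) 0 = (l.map (fun v => |v|)).foldl max 0 := by
    rw [List.foldl_map]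
  by_cases hnil : mags = []
  · have : l.map (fun v => |v|) = [] := by
      have := PySem.List.sorted_perm (xs := l.map (fun v => |v|)) (key := fun x : Int => x) (rev := false)
      rw [← hm, hnil] at this
      exact (List.Perm.nil_eq this).symm
    simp [hfold, this, hnil]
  · simp only [if_neg hnil]
    have hperm : mags.Perm (l.map (fun v => |v|)) := by
      rw [hm]; exact PySem.List.sorted_perm (xs := l.map (fun v => |v|)) (key := fun x : Int => x) (rev := false)
    have hpw : mags.Pairwise (· ≤ ·) := by
      rw [hm]
      simpa using PySem.List.sorted_pairwise (xs := l.map (fun v => |v|)) (key := fun x : Int => x)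
    have hnn : ∀ y ∈ mags, 0 ≤ y := by
      intro y hy
      have : y ∈ l.map (fun v => |v|) := hperm.mem_iff.mp hy
      obtain ⟨v, _, rfl⟩ := List.mem_map.mp this
      exact abs_nonneg v
    have hlen1 : 0 < mags.length := List.length_pos_of_ne_nil hnil
    have hlt : mags.length - 1 < mags.length := by omega
    have hget : PySem.List.pyGetD mags (-1) 0 = mags[mags.length - 1] := by
      have := PySem.List.pyGetD_neg_natCast (xs := mags) (d := (0:Int)) (k := 1)
        (by omega) (by exact_mod_cast hlen1)
      simpa using this
    rw [hget, hfold, foldl_max_perm hperm.symm 0]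
    exact foldl_max_sorted mags hpw hnn hnil hlt

-- ===== VERDICT (by name: the statement is the Claim_ definition above) =====
theorem frame_amplitude_py_spec : Claim_equal_frame_amplitude_py := by
  intro pcm fi ch _ hpre
  unfold Spec_frame_amplitude_py frame_amplitude_py frame_amplitude_py_alt
  by_cases hch : ch ≤ 0
  · simp only [if_pos hch]
    rw [PySem.List.pyRange_one_eq_nil (by omega)]
    rfl
  · simp only [if_neg hch]
    push Not at hch
    rcases hpre with h | ⟨hs, he⟩
    · omega
    · have hstep : (fun (max_amp i : Int) =>
          let value := PySem.List.pyGetD pcm i 0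
          let value := if value < 0 then -value else value
          if value > max_amp then value else max_amp)
          = (fun (acc i : Int) => max acc |PySem.List.pyGetD pcm i 0|) := by
        funext m i
        exact amp_step m (PySem.List.pyGetD pcm i 0)
      rw [hstep]
      have hr := amp_range_fold pcm (fi * ch) (fi * ch + ch) hs (by omega) he
        (fun m v => max m |v|) 0
      exact hr.trans (amp_sorted_closed _)
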